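-- pv_equiv track=rewrite | github.com/Fierthraix/aoc2021 | day12.py | exists_repeating_subsequence
-- ===== SOURCE A (Python) =====
-- from typing import Dict, List, Optional, Set, Tuple
--
-- def exists_repeating_subsequence(seqs: List[object]) -> bool:
--     max_len = len(seqs) // 2
--
--     for start in range(len(seqs) - 1):
--         for seq_len in range(4, (len(seqs) - start + 1) // 2):
--             curr_seq = seqs[start:start + seq_len]
--             for trial_start in range(start + seq_len, len(seqs) - seq_len + 1):
--                 trial = seqs[trial_start:trial_start + seq_len]
--                 if curr_seq == trial:
--                     return True
--     return False
-- ===== SOURCE B (Python) =====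
-- def exists_repeating_subsequence(seqs):
--     # One pass: any repeat of length >= 4 implies a repeated 4-gram at distance >= 4,
--     # so hash each 4-gram to its first index and test the gap.
--     n = len(seqs)
--     first = {}
--     for t in range(n - 3):
--         gram = tuple(seqs[t:t + 4])
--         s = first.get(gram)
--         if s is not None:
--             if t - s >= 4:
--                 return True
--         else:
--             first[gram] = t
--     return False
-- ===== Notes on version B (the rewrite author's own statement) =====
-- stated objective: faster
-- what changed: Replaced A's four-level nested scan over all starts, lengths and trial positions with a single left-to-right pass that hashes each 4-gram to its first index and reports a repeat as soon as a 4-gram recurs at distance >= 4, which is equivalent because any repeat of length >= 4 contains a repeated 4-gram.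
-- intended difference: On lists whose only pair of equal non-overlapping 4-grams is the last 8 elements forming two equal halves (e.g. [1,2,3,4,1,2,3,4]), A returns False because its seq_len bound (len-start+1)//2 is off by one, while B returns True, the intended answer since a repeated length-4 subsequence does exist. — e.g. on exists_repeating_subsequence([1, 2, 3, 4, 1, 2, 3, 4]): A returns false, B returns true
import Mathlib
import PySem

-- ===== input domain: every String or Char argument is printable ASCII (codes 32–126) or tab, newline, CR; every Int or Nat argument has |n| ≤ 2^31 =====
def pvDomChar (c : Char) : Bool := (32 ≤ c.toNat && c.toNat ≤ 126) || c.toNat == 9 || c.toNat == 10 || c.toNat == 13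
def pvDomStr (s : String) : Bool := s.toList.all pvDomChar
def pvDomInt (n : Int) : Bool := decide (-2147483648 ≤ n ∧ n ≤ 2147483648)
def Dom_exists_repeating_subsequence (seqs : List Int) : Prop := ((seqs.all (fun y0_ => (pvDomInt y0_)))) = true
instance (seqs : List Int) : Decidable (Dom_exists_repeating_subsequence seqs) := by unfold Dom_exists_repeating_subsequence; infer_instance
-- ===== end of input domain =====

-- B replaces A's quadruple nested scan by a single pass hashing each 4-gram to its first
-- index (any repeat of length ≥ 4 implies a repeated 4-gram at distance ≥ 4): objective faster.

-- ===== PORT A =====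
def exists_repeating_subsequence (seqs : List Int) : Bool :=
  let n : Int := seqs.length
  let _max_len : Int := PySem.Int.floordiv n 2   -- computed but unused, as in A
  (PySem.List.pyRange 0 (n - 1) 1).any fun start =>
    (PySem.List.pyRange 4 (PySem.Int.floordiv (n - start + 1) 2) 1).any fun seq_len =>
      let curr_seq := PySem.List.slice seqs (some start) (some (start + seq_len))
      (PySem.List.pyRange (start + seq_len) (n - seq_len + 1) 1).any fun trial_start =>
        PySem.List.slice seqs (some trial_start) (some (trial_start + seq_len)) == curr_seq

-- ===== PORT B =====
-- the early-returning for-loop of Source B, with the dict of first occurrences as accumulator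
def pvBLoop (seqs : List Int) : List Int → PySem.Dict (List Int) Int → Bool
  | [], _ => false
  | t :: rest, first =>
    let gram := PySem.List.slice seqs (some t) (some (t + 4))
    match first.get? gram with
    | some s => if 4 ≤ t - s then true else pvBLoop seqs rest first
    | none => pvBLoop seqs rest (first.insert gram t)

def exists_repeating_subsequence_alt (seqs : List Int) : Bool :=
  let n : Int := seqs.length
  pvBLoop seqs (PySem.List.pyRange 0 (n - 3) 1) PySem.Dict.empty

-- ===== PRECONDITION & SPEC =====
-- A misses a repeat whose only witnessing pair of equal non-overlapping 4-grams is the final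
-- 8 elements split into two equal halves: there A returns False although the repeat exists,
-- while B returns True, the intended answer (A's bound `(len-start+1)//2` is off by one).
def D_exists_repeating_subsequence (seqs : List Int) : Prop :=
  8 ≤ seqs.length ∧ ∀ s < seqs.length, ∀ t < seqs.length,
    ((seqs.drop s).take 4 = (seqs.drop t).take 4 ∧ s + 4 ≤ t ↔
      s + 8 = seqs.length ∧ t + 4 = seqs.length)
instance (seqs : List Int) : Decidable (D_exists_repeating_subsequence seqs) := by
  unfold D_exists_repeating_subsequence; infer_instance

def Spec_exists_repeating_subsequence (seqs : List Int) (out : Bool) : Prop :=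
  ¬ D_exists_repeating_subsequence seqs → out = exists_repeating_subsequence_alt seqs
instance (seqs : List Int) (out : Bool) : Decidable (Spec_exists_repeating_subsequence seqs out) := by
  unfold Spec_exists_repeating_subsequence; infer_instance

def pvDiffWitness_exists_repeating_subsequence : List Int := [1, 2, 3, 4, 1, 2, 3, 4]
def pvDiffWitnessOut_exists_repeating_subsequence : Bool × Bool := (false, true)

-- ===== CLAIM (what is proved, stated in full; the proofs are below) =====
def Claim_unchanged_exists_repeating_subsequence : Prop := ∀ (seqs : List Int), Dom_exists_repeating_subsequence seqs → Spec_exists_repeating_subsequence seqs (exists_repeating_subsequence seqs)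
def Claim_changed_exists_repeating_subsequence : Prop := Dom_exists_repeating_subsequence (pvDiffWitness_exists_repeating_subsequence) ∧ D_exists_repeating_subsequence (pvDiffWitness_exists_repeating_subsequence) ∧ exists_repeating_subsequence (pvDiffWitness_exists_repeating_subsequence) = pvDiffWitnessOut_exists_repeating_subsequence.1 ∧ exists_repeating_subsequence_alt (pvDiffWitness_exists_repeating_subsequence) = pvDiffWitnessOut_exists_repeating_subsequence.2 ∧ pvDiffWitnessOut_exists_repeating_subsequence.1 ≠ pvDiffWitnessOut_exists_repeating_subsequence.2
def Claim_exact_exists_repeating_subsequence : Prop := ∀ (seqs : List Int), Dom_exists_repeating_subsequence seqs → D_exists_repeating_subsequence seqs → exists_repeating_subsequence seqs ≠ exists_repeating_subsequence_alt seqs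

-- ===== LEMMAS AND PROOFS =====

-- `gram i` = seqs[i:i+4], the 4-gram at Int index i
def pvGram (seqs : List Int) (i : Int) : List Int :=
  PySem.List.slice seqs (some i) (some (i + 4))

-- a pair of equal 4-grams at distance ≥ 4, second one in bounds
def pvHit (seqs : List Int) (s t : Int) : Prop :=
  0 ≤ s ∧ s + 4 ≤ t ∧ t + 4 ≤ (seqs.length : Int) ∧ pvGram seqs s = pvGram seqs t

theorem pvGram_natCast (seqs : List Int) (s : Nat) :
    pvGram seqs (s : Int) = (seqs.drop s).take 4 := by
  have := PySem.List.slice_natCast_add (xs := seqs) (j := s) (n := 4)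
  simpa [pvGram] using this

theorem pvGram_eq_take (seqs : List Int) (a L : Int) (ha : 0 ≤ a) (hL : 4 ≤ L) :
    (PySem.List.slice seqs (some a) (some (a + L))).take 4 = pvGram seqs a := by
  rw [pvGram, PySem.List.slice_toNat seqs ha (by omega), PySem.List.slice_toNat seqs ha (by omega),
    List.take_take]
  congr 1
  all_goals omega

theorem pvA_iff (seqs : List Int) :
    exists_repeating_subsequence seqs = true ↔
      ∃ s t : Int, pvHit seqs s t ∧ s + 9 ≤ (seqs.length : Int) := by
  unfold exists_repeating_subsequence
  simp only [List.any_eq_true, PySem.List.mem_pyRange_one, beq_iff_eq]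
  constructor
  · rintro ⟨st, ⟨hst0, hst1⟩, L, ⟨hL4, hLlt⟩, t, ⟨ht0, ht1⟩, heq⟩
    have hL2 : (L + 1) * 2 ≤ (seqs.length : Int) - st + 1 := by
      rw [← PySem.Int.le_floordiv_iff_mul_le (by omega)]; omega
    refine ⟨st, t, ⟨by omega, by omega, by omega, ?_⟩, by omega⟩
    rw [← pvGram_eq_take seqs st L hst0 hL4, ← pvGram_eq_take seqs t L (by omega) hL4, heq]
  · rintro ⟨s, t, ⟨hs0, hst, htn, hg⟩, h9⟩
    refine ⟨s, ⟨hs0, by omega⟩, 4, ⟨le_refl _, ?_⟩, t, ⟨by omega, by omega⟩, ?_⟩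
    · have h5 : (5 : Int) * 2 ≤ (seqs.length : Int) - s + 1 := by omega
      have := (PySem.Int.le_floordiv_iff_mul_le (a := (seqs.length : Int) - s + 1) (b := 2)
        (q := 5) (by omega)).mpr h5
      omega
    · exact hg.symm

-- the invariant of B's dict: it maps each seen 4-gram to an index with that gram,
-- below the current position and no later than any seen occurrence
def pvInv (seqs : List Int) (d : PySem.Dict (List Int) Int) (t0 : Int) : Prop :=
  (∀ g s, d.get? g = some s → 0 ≤ s ∧ s < t0 ∧ pvGram seqs s = g) ∧
  (∀ s, 0 ≤ s → s < t0 → ∃ s0, d.get? (pvGram seqs s) = some s0 ∧ s0 ≤ s)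

theorem pvBLoop_iff (seqs : List Int) (k : Nat) (t0 : Int) (h0 : 0 ≤ t0)
    (hk : ((seqs.length : Int) - 3 - t0).toNat = k)
    (d : PySem.Dict (List Int) Int) (hInv : pvInv seqs d t0) :
    pvBLoop seqs (PySem.List.pyRange t0 ((seqs.length : Int) - 3) 1) d = true ↔
      ∃ s t : Int, pvHit seqs s t ∧ t0 ≤ t := by
  induction k generalizing t0 d with
  | zero =>
    rw [PySem.List.pyRange_one_eq_nil (by omega)]
    simp only [pvBLoop, Bool.false_eq_true, false_iff]
    rintro ⟨s, t, ⟨_, _, htn, _⟩, ht0⟩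
    omega
  | succ k ih =>
    have hlt : t0 < (seqs.length : Int) - 3 := by omega
    rw [PySem.List.pyRange_one_cons hlt]
    rcases hg : d.get? (PySem.List.slice seqs (some t0) (some (t0 + 4))) with _ | s
    · -- gram not yet seen: insert it
      have hg' : d.get? (pvGram seqs t0) = none := hg
      have hstep : pvInv seqs (d.insert (pvGram seqs t0) t0) (t0 + 1) := by
        constructor
        · intro g s hgets
          by_cases hge : g = pvGram seqs t0
          · subst hge
            rw [PySem.Dict.get?_insert_self] at hgets
            obtain rfl : t0 = s := by injection hgets
            exact ⟨h0, by omega, rfl⟩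
          · rw [PySem.Dict.get?_insert_of_ne _ _ hge] at hgets
            obtain ⟨h1, h2, h3⟩ := hInv.1 g s hgets
            exact ⟨h1, by omega, h3⟩
        · intro s hs0 hs1
          by_cases hse : s = t0
          · subst hse
            exact ⟨s, PySem.Dict.get?_insert_self _ _ _, le_refl _⟩
          · have hslt : s < t0 := by omega
            obtain ⟨s0, hget, hle⟩ := hInv.2 s hs0 hslt
            refine ⟨s0, ?_, hle⟩
            rw [PySem.Dict.get?_insert_of_ne]
            · exact hget
            · intro he
              rw [he, hg'] at hget
              cases hget
      simp only [pvBLoop, hg]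
      rw [show PySem.List.slice seqs (some t0) (some (t0 + 4)) = pvGram seqs t0 from rfl,
        ih (t0 + 1) (by omega) (by omega) _ hstep]
      constructor
      · rintro ⟨s, t, hhit, ht⟩
        exact ⟨s, t, hhit, by omega⟩
      · rintro ⟨s, t, hhit, ht⟩
        refine ⟨s, t, hhit, ?_⟩
        rcases eq_or_lt_of_le ht with he | hlt'
        · exfalso
          obtain ⟨hs0, hst, htn, hgr⟩ := hhit
          obtain ⟨s0, hget, _⟩ := hInv.2 s hs0 (by omega)
          rw [hgr, ← he, hg'] at hget
          cases hget
        · omega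
    · -- gram seen before at index s
      have hg' : d.get? (pvGram seqs t0) = some s := hg
      obtain ⟨hs0, hslt, hgr⟩ := hInv.1 _ s hg
      by_cases h4 : 4 ≤ t0 - s
      · simp only [pvBLoop, hg, if_pos h4, true_iff]
        exact ⟨s, t0, ⟨hs0, by omega, by omega, hgr⟩, le_refl _⟩
      · simp only [pvBLoop, hg, if_neg h4]
        have hstep : pvInv seqs d (t0 + 1) := by
          constructor
          · intro g s' hgets
            obtain ⟨h1, h2, h3⟩ := hInv.1 g s' hgets
            exact ⟨h1, by omega, h3⟩
          · intro s' hs0' hs1'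
            by_cases hse : s' = t0
            · subst hse
              exact ⟨s, hg', by omega⟩
            · exact hInv.2 s' hs0' (by omega)
        rw [ih (t0 + 1) (by omega) (by omega) d hstep]
        constructor
        · rintro ⟨s', t, hhit, ht⟩
          exact ⟨s', t, hhit, by omega⟩
        · rintro ⟨s', t, hhit, ht⟩
          refine ⟨s', t, hhit, ?_⟩
          rcases eq_or_lt_of_le ht with he | hlt'
          · exfalso
            obtain ⟨hs0', hst', htn', hgr'⟩ := hhit
            obtain ⟨s0, hget, hle⟩ := hInv.2 s' hs0' (by omega)
            rw [hgr', ← he, hg'] at hget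
            obtain rfl : s = s0 := by injection hget
            omega
          · omega

theorem pvB_iff (seqs : List Int) :
    exists_repeating_subsequence_alt seqs = true ↔ ∃ s t : Int, pvHit seqs s t := by
  unfold exists_repeating_subsequence_alt
  rw [pvBLoop_iff seqs (((seqs.length : Int) - 3).toNat) 0 (le_refl _) (by omega)
    PySem.Dict.empty ⟨by simp [PySem.Dict.get?_empty], by intro s h1 h2; omega⟩]
  constructor
  · rintro ⟨s, t, h, _⟩; exact ⟨s, t, h⟩
  · rintro ⟨s, t, h⟩
    obtain ⟨h1, h2, h3, h4⟩ := h
    exact ⟨s, t, ⟨h1, h2, h3, h4⟩, by omega⟩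

-- equal 4-grams with the left one full force the right one in bounds
theorem pvGram_len (seqs : List Int) (s t : Nat) (hst : s + 4 ≤ t) (ht : t < seqs.length)
    (hg : (seqs.drop s).take 4 = (seqs.drop t).take 4) : t + 4 ≤ seqs.length := by
  have := congrArg List.length hg
  simp only [List.length_take, List.length_drop] at this
  omega

-- D says: the 4-gram pairs that witness a repeat are exactly the final tail pair;
-- so no hit with s + 9 ≤ length, and the tail pair itself is a hit
theorem pvD_noP9 (seqs : List Int) (hD : D_exists_repeating_subsequence seqs) :
    ¬ ∃ s t : Int, pvHit seqs s t ∧ s + 9 ≤ (seqs.length : Int) := by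
  rintro ⟨s, t, ⟨hs0, hst, htn, hgr⟩, h9⟩
  have ht0 : 0 ≤ t := by omega
  obtain ⟨sn, rfl⟩ := Int.eq_ofNat_of_zero_le hs0
  obtain ⟨tn, rfl⟩ := Int.eq_ofNat_of_zero_le ht0
  have := (hD.2 sn (by omega) tn (by omega)).mp
    ⟨by rw [← pvGram_natCast, ← pvGram_natCast, hgr], by omega⟩
  omega

theorem pvD_hit (seqs : List Int) (hD : D_exists_repeating_subsequence seqs) :
    pvHit seqs ((seqs.length - 8 : Nat) : Int) ((seqs.length - 4 : Nat) : Int) := by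
  obtain ⟨h8, hiff⟩ := hD
  obtain ⟨htail, -⟩ := (hiff (seqs.length - 8) (by omega) (seqs.length - 4) (by omega)).mpr
    ⟨by omega, by omega⟩
  exact ⟨by omega, by omega, by omega, by rw [pvGram_natCast, pvGram_natCast, htail]⟩

-- ===== VERDICT (by name: the statement is the Claim_ definition above) =====
theorem exists_repeating_subsequence_spec : Claim_unchanged_exists_repeating_subsequence := by
  intro seqs _ hnD
  rw [Bool.eq_iff_iff, pvA_iff, pvB_iff]
  constructor
  · rintro ⟨s, t, h, _⟩; exact ⟨s, t, h⟩
  · rintro ⟨s, t, h⟩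
    by_contra hno
    apply hnD
    obtain ⟨hs0, hst, htn, hgr⟩ := h
    have h8 : 8 ≤ seqs.length := by omega
    -- the hit must be the tail pair, else a P9 hit would exist
    have hs9 : ¬(s + 9 ≤ (seqs.length : Int)) := fun hc => hno ⟨s, t, ⟨hs0, hst, htn, hgr⟩, hc⟩
    have hse : s = ((seqs.length - 8 : Nat) : Int) := by omega
    have hte : t = ((seqs.length - 4 : Nat) : Int) := by omega
    rw [hse, hte, pvGram_natCast, pvGram_natCast] at hgr
    refine ⟨h8, fun sn hsn tn htn' => ⟨?_, ?_⟩⟩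
    · rintro ⟨hg4, h1⟩
      have h2 : tn + 4 ≤ seqs.length := pvGram_len seqs sn tn h1 htn' hg4
      have hs9' : ¬(sn + 9 ≤ seqs.length) := fun hc =>
        hno ⟨(sn : Int), (tn : Int), ⟨by omega, by omega, by omega,
          by rw [pvGram_natCast, pvGram_natCast, hg4]⟩, by omega⟩
      omega
    · rintro ⟨h1, h2⟩
      refine ⟨?_, by omega⟩
      have hsn' : sn = seqs.length - 8 := by omega
      have htn'' : tn = seqs.length - 4 := by omega
      rw [hsn', htn'']
      exact hgr

theorem exists_repeating_subsequence_changed : Claim_changed_exists_repeating_subsequence := by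
  unfold Claim_changed_exists_repeating_subsequence; decide

theorem exists_repeating_subsequence_tight : Claim_exact_exists_repeating_subsequence := by
  intro seqs _ hD
  have hA : exists_repeating_subsequence seqs = false := by
    rw [← Bool.not_eq_true, pvA_iff]
    exact pvD_noP9 seqs hD
  have hB : exists_repeating_subsequence_alt seqs = true := by
    rw [pvB_iff]
    exact ⟨_, _, pvD_hit seqs hD⟩
  rw [hA, hB]; exact Bool.false_ne_true
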